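-- pv_equiv track=rewrite | github.com/Xu60069/pythonApp | codeforces/edu35/NearestMin.py | solve
-- ===== SOURCE A (Python) =====
-- def solve (arr):
--     minPos=0  #position of current min val
--     minDist=999999999 #distance between 2 min val, set to MAX
--     minVal=arr[0]
--     for i in range(1,len(arr)):
--         if arr[i]<minVal:
--             minVal=arr[i]  # new min
--             minDist=999999999
--             minPos=i
--         elif arr[i]==minVal:
--             dist=i-minPos   #find next minVal, calc dist
--             if dist < minDist:
--                 minDist=dist
--             minPos=i
--     return minDist
-- ===== SOURCE B (Python) =====
-- def solve(arr):
--     m = arr[0]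
--     for x in arr:
--         if x < m:
--             m = x
--     idxs = [i for i, x in enumerate(arr) if x == m]
--     best = 999999999
--     for a, b in zip(idxs, idxs[1:]):
--         if b - a < best:
--             best = b - a
--     return best
-- ===== Notes on version B (the rewrite author's own statement) =====
-- stated objective: alternative
-- what changed: Replaces A's single stateful pass (tracking current min, last position and running reset distance) by a three-step decomposition: find the minimum, collect the indices of its occurrences, then take the smallest gap between consecutive indices.
import Mathlib
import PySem

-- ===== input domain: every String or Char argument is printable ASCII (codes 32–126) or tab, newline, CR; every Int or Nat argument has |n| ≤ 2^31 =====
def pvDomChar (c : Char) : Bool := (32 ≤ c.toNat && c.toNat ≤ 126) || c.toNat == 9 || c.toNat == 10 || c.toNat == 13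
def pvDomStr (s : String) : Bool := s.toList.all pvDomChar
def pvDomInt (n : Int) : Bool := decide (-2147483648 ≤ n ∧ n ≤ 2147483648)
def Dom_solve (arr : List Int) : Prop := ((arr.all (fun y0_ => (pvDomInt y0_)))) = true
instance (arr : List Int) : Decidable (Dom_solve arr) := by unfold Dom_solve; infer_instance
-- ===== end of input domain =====

-- B decomposes A's single stateful pass into: min scan, index collection, smallest consecutive gap (objective: alternative).

-- ===== PORT A =====
def solve (arr : List Int) : Int :=
  let fin := (PySem.List.pyRange 1 (arr.length : Int) 1).foldl
    (fun (st : Int × Int × Int) i =>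
      let minPos := st.1
      let minDist := st.2.1
      let minVal := st.2.2
      let x := PySem.List.pyGetD arr i 0
      if x < minVal then (i, (999999999 : Int), x)
      else if x = minVal then
        let dist := i - minPos
        (i, if dist < minDist then dist else minDist, minVal)
      else st)
    (0, 999999999, PySem.List.pyGetD arr 0 0)
  fin.2.1

-- ===== PORT B =====
def solve_alt (arr : List Int) : Int :=
  let m := arr.foldl (fun m x => if x < m then x else m) (PySem.List.pyGetD arr 0 0)   -- explicit min scan seeded with the first element
  let idxs := ((PySem.List.enumerate arr 0).filter (fun p => p.2 == m)).map (fun p => p.1)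
  (idxs.zip (PySem.List.slice idxs (some 1) none)).foldl
    (fun best p => if p.2 - p.1 < best then p.2 - p.1 else best) 999999999

-- ===== PRECONDITION & SPEC =====
-- Pre_ excludes only the empty list, on which A raises IndexError at the initial element access.
def Pre_solve (arr : List Int) : Prop := arr ≠ []
instance (arr : List Int) : Decidable (Pre_solve arr) := by unfold Pre_solve; infer_instance
def pvWitness_solve : List Int := [3, 1, 2, 1]
def Spec_solve (arr : List Int) (out : Int) : Prop := out = solve_alt arr
instance (arr : List Int) (out : Int) : Decidable (Spec_solve arr out) := by unfold Spec_solve; infer_instance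

-- ===== CLAIM (what is proved, stated in full; the proofs are below) =====
def Claim_equal_solve : Prop := ∀ (arr : List Int), Dom_solve arr → Pre_solve arr → Spec_solve arr (solve arr)

-- ===== LEMMAS AND PROOFS =====

-- A's loop step, on (index, value) pairs.
def pvStep (st : Int × Int × Int) (p : Int × Int) : Int × Int × Int :=
  if p.2 < st.2.2 then (p.1, (999999999 : Int), p.2)
  else if p.2 = st.2.2 then
    (p.1, if p.1 - st.1 < st.2.1 then p.1 - st.1 else st.2.1, st.2.2)
  else st

-- smallest consecutive gap, recursively
def pvGaps (best : Int) : List Int → Int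
  | a :: b :: r => pvGaps (if b - a < best then b - a else best) (b :: r)
  | _ => best

def pvLastD (d : Int) (l : List Int) : Int := l.foldl (fun _ x => x) d

def pvOcc (m : Int) (e : List (Int × Int)) : List Int :=
  (e.filter (fun p => p.2 == m)).map (fun p => p.1)

def pvMin (v : Int) (e : List (Int × Int)) : Int := (e.map (fun p => p.2)).foldl min v

lemma pvZipFold (l : List Int) (best : Int) :
    (l.zip (l.drop 1)).foldl (fun best p => if p.2 - p.1 < best then p.2 - p.1 else best) best
      = pvGaps best l := by
  induction l generalizing best with
  | nil => rfl
  | cons a t ih =>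
    cases t with
    | nil => rfl
    | cons b r => simp only [List.drop, List.zip_cons_cons, List.foldl, pvGaps]; exact ih _

lemma pvFoldlMin_le (l : List Int) (v : Int) : l.foldl min v ≤ v := by
  induction l generalizing v with
  | nil => simp
  | cons a t ih => exact le_trans (ih _) (min_le_left _ _)

lemma pvFoldlMin_eq_iff (l : List Int) (v : Int) :
    l.foldl min v = v ↔ ∀ y ∈ l, v ≤ y := by
  induction l generalizing v with
  | nil => simp
  | cons a t ih =>
    simp only [List.foldl, List.mem_cons]
    constructor
    · intro h
      have hle : t.foldl min (min v a) ≤ min v a := pvFoldlMin_le _ _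
      have hva : v ≤ a := by
        rcases le_or_gt v a with h' | h'
        · exact h'
        · exfalso; rw [min_eq_right h'.le] at hle h; omega
      rw [min_eq_left hva] at h
      intro y hy
      rcases hy with rfl | hy
      · exact hva
      · exact (ih v).mp h y hy
    · intro h
      have hva : v ≤ a := h a (Or.inl rfl)
      rw [min_eq_left hva]
      exact (ih v).mpr (fun y hy => h y (Or.inr hy))

lemma pvMin_cons (v : Int) (p : Int × Int) (e : List (Int × Int)) :
    pvMin v (p :: e) = pvMin (min v p.2) e := by
  simp [pvMin]

lemma pvMin_le (v : Int) (e : List (Int × Int)) : pvMin v e ≤ v := pvFoldlMin_le _ _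

lemma pvMin_eq_iff (v : Int) (e : List (Int × Int)) :
    pvMin v e = v ↔ ∀ p ∈ e, v ≤ p.2 := by
  rw [pvMin, pvFoldlMin_eq_iff]
  simp only [List.mem_map]
  constructor
  · intro h p hp; exact h p.2 ⟨p, hp, rfl⟩
  · rintro h y ⟨p, hp, rfl⟩; exact h p hp

lemma pvOcc_cons (m : Int) (p : Int × Int) (e : List (Int × Int)) :
    pvOcc m (p :: e) = if p.2 = m then p.1 :: pvOcc m e else pvOcc m e := by
  simp only [pvOcc, List.filter]
  by_cases h : p.2 = m
  · simp [h]
  · have hb : (p.2 == m) = false := by simp [h]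
    rw [hb, if_neg h]

lemma pvMain (e : List (Int × Int)) : ∀ (pos best v : Int),
    e.foldl pvStep (pos, best, v) =
      if ∀ p ∈ e, v ≤ p.2
      then (pvLastD 0 (pos :: pvOcc v e), pvGaps best (pos :: pvOcc v e), v)
      else (pvLastD 0 (pvOcc (pvMin v e) e), pvGaps 999999999 (pvOcc (pvMin v e) e), pvMin v e) := by
  induction e with
  | nil =>
    intro pos best v
    simp [pvOcc, pvGaps, pvLastD]
  | cons p rest ih =>
    intro pos best v
    simp only [List.foldl]
    by_cases h1 : p.2 < v
    · -- strictly smaller value: reset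
      have hstep : pvStep (pos, best, v) p = (p.1, 999999999, p.2) := by
        simp [pvStep, h1]
      rw [hstep, ih p.1 999999999 p.2]
      have hout : ¬ ∀ q ∈ p :: rest, v ≤ q.2 := by
        intro h; have := h p (List.mem_cons_self ..); omega
      rw [if_neg hout]
      have hmin : pvMin v (p :: rest) = pvMin p.2 rest := by
        rw [pvMin_cons, min_eq_right h1.le]
      by_cases h2 : ∀ q ∈ rest, p.2 ≤ q.2
      · rw [if_pos h2]
        have hm : pvMin p.2 rest = p.2 := (pvMin_eq_iff _ _).mpr h2
        rw [hmin, hm, pvOcc_cons, if_pos rfl]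
      · rw [if_neg h2, hmin]
        have hm : pvMin p.2 rest < p.2 :=
          lt_of_le_of_ne (pvMin_le _ _) (fun h => h2 ((pvMin_eq_iff _ _).mp h))
        rw [pvOcc_cons, if_neg (by omega)]
    · by_cases h2 : p.2 = v
      · -- equal value: update gap
        have hstep : pvStep (pos, best, v) p
            = (p.1, if p.1 - pos < best then p.1 - pos else best, v) := by
          simp [pvStep, h2]
        rw [hstep, ih p.1 _ v]
        have hmin : pvMin v (p :: rest) = pvMin v rest := by
          rw [pvMin_cons, h2, min_self]
        by_cases h3 : ∀ q ∈ rest, v ≤ q.2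
        · have hout : ∀ q ∈ p :: rest, v ≤ q.2 := by
            intro q hq; rcases List.mem_cons.mp hq with rfl | hq
            · omega
            · exact h3 q hq
          rw [if_pos h3, if_pos hout, pvOcc_cons, if_pos h2]
          rfl
        · have hout : ¬ ∀ q ∈ p :: rest, v ≤ q.2 := by
            intro h; exact h3 (fun q hq => h q (List.mem_cons_of_mem _ hq))
          rw [if_neg h3, if_neg hout, hmin]
          have hm : pvMin v rest < v :=
            lt_of_le_of_ne (pvMin_le _ _) (fun h => h3 ((pvMin_eq_iff _ _).mp h))
          rw [pvOcc_cons, if_neg (by omega)]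
      · -- strictly larger value: skip
        have hv : v < p.2 := by omega
        have hstep : pvStep (pos, best, v) p = (pos, best, v) := by
          simp [pvStep, h1, h2]
        rw [hstep, ih pos best v]
        have hmin : pvMin v (p :: rest) = pvMin v rest := by
          rw [pvMin_cons, min_eq_left hv.le]
        by_cases h3 : ∀ q ∈ rest, v ≤ q.2
        · have hout : ∀ q ∈ p :: rest, v ≤ q.2 := by
            intro q hq; rcases List.mem_cons.mp hq with rfl | hq
            · omega
            · exact h3 q hq
          rw [if_pos h3, if_pos hout, pvOcc_cons, if_neg (by omega)]
        · have hout : ¬ ∀ q ∈ p :: rest, v ≤ q.2 := by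
            intro h; exact h3 (fun q hq => h q (List.mem_cons_of_mem _ hq))
          rw [if_neg h3, if_neg hout, hmin]
          have hm : pvMin v rest ≤ v := pvMin_le _ _
          rw [pvOcc_cons, if_neg (by omega)]

lemma pvGetD0 (a : Int) (t : List Int) : PySem.List.pyGetD (a :: t) 0 0 = a := by
  simp [PySem.List.pyGetD, PySem.List.pyIdx?, PySem.List.pyGet?]

lemma pvEnumSnd (t : List Int) (s v : Int) :
    (∀ p ∈ PySem.List.enumerate t s, v ≤ p.2) ↔ ∀ y ∈ t, v ≤ y := by
  constructor
  · intro h y hy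
    obtain ⟨k, hk, hg⟩ := List.mem_iff_getElem.mp hy
    exact hg ▸ h (s + k, t[k]) ((PySem.List.mem_enumerate_iff _ _ _).mpr ⟨k, hk, rfl⟩)
  · intro h p hp
    obtain ⟨k, hk, rfl⟩ := (PySem.List.mem_enumerate_iff _ _ _).mp hp
    exact h t[k] (List.getElem_mem hk)

-- bridge A
lemma pvBridgeA (a : Int) (t : List Int) :
    solve (a :: t) = ((PySem.List.enumerate t 1).foldl pvStep (0, 999999999, a)).2.1 := by
  have hlen : (0:Int) < ((a :: t).length : Int) := by
    simp only [List.length_cons]; push_cast; omega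
  have henum := PySem.List.enumerate_eq_map_pyRange (xs := a :: t) (d := 0)
  rw [PySem.List.len_eq] at henum
  rw [PySem.List.pyRange_one_cons hlen, List.map_cons, PySem.List.enumerate_cons] at henum
  obtain ⟨-, h2⟩ := List.cons_eq_cons.mp henum
  simp only [solve, pvGetD0]
  rw [show ((0:Int) + 1) = 1 from rfl] at h2
  rw [h2, List.foldl_map]
  rfl

-- bridge B
lemma pvBridgeB (a : Int) (t : List Int) :
    solve_alt (a :: t) = pvGaps 999999999 (pvOcc (t.foldl min a) (PySem.List.enumerate (a :: t) 0)) := by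
  simp only [solve_alt, pvGetD0]
  have hmin : (a :: t).foldl (fun m x => if x < m then x else m) a = t.foldl min a := by
    have hf : (fun (m x : Int) => if x < m then x else m) = min := by
      funext m x; rcases lt_trichotomy x m with h | h | h <;> simp [min_def] <;> omega
    rw [hf]; simp
  rw [hmin, PySem.List.slice_from_one, ← List.drop_one, pvZipFold]
  rfl

-- ===== VERDICT (by name: the statement is the Claim_ definition above) =====
theorem solve_spec : Claim_equal_solve := by
  intro arr _ hpre
  unfold Spec_solve
  cases arr with
  | nil => exact absurd rfl hpre
  | cons a t =>
    rw [pvBridgeA, pvBridgeB, pvMain]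
    have hmap : pvMin a (PySem.List.enumerate t 1) = t.foldl min a := by
      unfold pvMin
      rw [show (fun p : Int × Int => p.2) = (Prod.snd) from rfl, PySem.List.map_snd_enumerate]
    by_cases h : ∀ p ∈ PySem.List.enumerate t 1, a ≤ p.2
    · rw [if_pos h]
      have ht : ∀ y ∈ t, a ≤ y := (pvEnumSnd t 1 a).mp h
      have hm : t.foldl min a = a := (pvFoldlMin_eq_iff _ _).mpr ht
      rw [hm, PySem.List.enumerate_cons, pvOcc_cons, if_pos rfl]
      norm_num
    · rw [if_neg h]
      have ht : ¬ ∀ y ∈ t, a ≤ y := fun hy => h ((pvEnumSnd t 1 a).mpr hy)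
      have hm : t.foldl min a < a :=
        lt_of_le_of_ne (pvFoldlMin_le _ _) (fun he => ht ((pvFoldlMin_eq_iff _ _).mp he))
      rw [PySem.List.enumerate_cons, pvOcc_cons, if_neg (by omega), hmap]
      norm_num
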